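-- pv_equiv track=rewrite | github.com/gafnts/kleister-nda-preprocessing | src/nda/label_transformer.py | sort_label_fields
-- ===== SOURCE A (Python) =====
-- def sort_label_fields(string: str) -> str:
--     schema_order = ["effective_date", "jurisdiction", "party", "term"]
--
--     pairs: list[tuple[str, str]] = []
--     for part in string.strip().split():
--         if "=" in part:
--             key, value = part.split("=", 1)
--             pairs.append((key, value))
--
--     grouped: dict[str, list[str]] = {k: [] for k in schema_order}
--     others: list[str] = []
--     for key, value in pairs:
--         if key in grouped:
--             grouped[key].append(f"{key}={value}")
--         else:
--             others.append(f"{key}={value}")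
--
--     result: list[str] = []
--     for key in schema_order:
--         result.extend(grouped[key])
--     result.extend(others)
--     return " ".join(result)
-- ===== SOURCE B (Python) =====
-- def sort_label_fields(string: str) -> str:
--     schema_order = ["effective_date", "jurisdiction", "party", "term"]
--     order_index = {k: i for i, k in enumerate(schema_order)}
--
--     pairs: list[tuple[str, str]] = []
--     for part in string.strip().split():
--         if "=" in part:
--             key, value = part.split("=", 1)
--             pairs.append((key, value))
--
--     ordered = sorted(pairs, key=lambda kv: order_index.get(kv[0], len(schema_order)))
--     return " ".join(f"{k}={v}" for k, v in ordered)
-- ===== Notes on version B (the rewrite author's own statement) =====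
-- stated objective: simpler
-- what changed: Replaces A's dict of per-schema-key buckets plus a leftover list (concatenated per schema key afterwards) with a single stable sort of the parsed pairs keyed by schema rank via order_index.get(key, len(schema_order)).
import Mathlib
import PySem

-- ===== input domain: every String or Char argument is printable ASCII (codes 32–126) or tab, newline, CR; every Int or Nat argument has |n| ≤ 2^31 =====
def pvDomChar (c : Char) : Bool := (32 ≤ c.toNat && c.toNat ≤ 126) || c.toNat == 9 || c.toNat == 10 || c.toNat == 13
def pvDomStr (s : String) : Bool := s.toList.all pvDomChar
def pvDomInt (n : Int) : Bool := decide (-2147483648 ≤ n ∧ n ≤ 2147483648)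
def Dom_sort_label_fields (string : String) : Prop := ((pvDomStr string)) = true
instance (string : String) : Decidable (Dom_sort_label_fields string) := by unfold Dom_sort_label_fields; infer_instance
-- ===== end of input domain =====

-- B replaces A's per-key dict buckets + others list with one stable sort of the pairs keyed by schema rank (simpler).


-- shared helpers: both Pythons parse the tokens and format "key=value" identically
def pvSchema : List String := ["effective_date", "jurisdiction", "party", "term"]

def pvFmt (kv : String × String) : String := kv.1 ++ "=" ++ kv.2

-- the parsing loop shared verbatim by A and B ('for part in string.strip().split(): if "=" in part: …')
def pvParse (string : String) : List (String × String) :=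
  (PySem.Str.split₀ (PySem.Str.strip string)).foldl
    (fun pairs part =>
      if PySem.Str.isIn "=" part then
        match PySem.Str.splitMax? part "=" 1 with
        | some (k :: v :: _) => pairs ++ [(k, v)]
        | _ => pairs          -- unreachable: '=' ∈ part gives exactly two pieces
      else pairs) []

-- ===== PORT A =====
def sort_label_fields (string : String) : String :=
  let pairs := pvParse string
  let grouped0 : PySem.Dict String (List String) :=
    PySem.Dict.ofList (pvSchema.map (fun k => (k, ([] : List String))))
  let st := pairs.foldl
    (fun (st : PySem.Dict String (List String) × List String) kv =>
      if st.1.contains kv.1 then (st.1.modify kv.1 [] (· ++ [pvFmt kv]), st.2)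
      else (st.1, st.2 ++ [pvFmt kv])) (grouped0, [])
  let result := pvSchema.foldl (fun r k => r ++ st.1.getD k []) []
  PySem.Str.join " " (result ++ st.2)

-- ===== PORT B =====
def pvOrderIndex : PySem.Dict String Int :=
  PySem.Dict.ofList ((PySem.List.enumerate pvSchema).map (fun p => (p.2, p.1)))

def pvRank (kv : String × String) : Int :=
  pvOrderIndex.getD kv.1 (PySem.List.len pvSchema)

def sort_label_fields_alt (string : String) : String :=
  let pairs := pvParse string
  let ordered := PySem.List.sorted pairs pvRank
  PySem.Str.join " " (ordered.map pvFmt)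

-- ===== PRECONDITION & SPEC =====
def Spec_sort_label_fields (string : String) (out : String) : Prop := out = sort_label_fields_alt string
instance (string : String) (out : String) : Decidable (Spec_sort_label_fields string out) := by unfold Spec_sort_label_fields; infer_instance

-- ===== CLAIM (what is proved, stated in full; the proofs are below) =====
def Claim_equal_sort_label_fields : Prop := ∀ (string : String), Dom_sort_label_fields string → Spec_sort_label_fields string (sort_label_fields string)

-- ===== LEMMAS AND PROOFS =====

-- insert lands after everything not-before it and before everything before it
theorem pv_insertBy_append {α : Type} (before : α → α → Bool) (x : α) (A C : List α)
    (hA : ∀ a ∈ A, before x a = false) (hC : ∀ c ∈ C, before x c = true) :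
    PySem.List.insertBy before x (A ++ C) = A ++ x :: C := by
  induction A with
  | nil =>
      cases C with
      | nil => simp [PySem.List.insertBy]
      | cons c C' => simp [PySem.List.insertBy, hC c (by simp)]
  | cons a A' ih =>
      have ha := hA a (by simp)
      simp only [List.cons_append, PySem.List.insertBy, ha]
      simp [ih (fun y hy => hA y (by simp [hy]))]

-- bucket decomposition of the stable insertion sort for a rank with values in {0,1,2,3,4}
def pvBuckets {α : Type} (r : α → Int) (ps : List α) : List α :=
  ps.filter (fun x => r x == 0) ++ ps.filter (fun x => r x == 1) ++
  ps.filter (fun x => r x == 2) ++ ps.filter (fun x => r x == 3) ++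
  ps.filter (fun x => r x == 4)

theorem pv_mem_filter_rank {α : Type} (r : α → Int) (i : Int) (qs : List α) (y : α)
    (hy : y ∈ qs.filter (fun z => r z == i)) : r y = i := by
  simpa using (List.mem_filter.mp hy).2

theorem pv_insert_buckets {α : Type} (r : α → Int) (x : α) (qs : List α)
    (hx : 0 ≤ r x ∧ r x ≤ 4) :
    PySem.List.insertBy (fun a b => decide (r a < r b)) x (pvBuckets r qs) =
      pvBuckets r (qs ++ [x]) := by
  have h05 : r x = 0 ∨ r x = 1 ∨ r x = 2 ∨ r x = 3 ∨ r x = 4 := by omega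
  rcases h05 with h | h | h | h | h
  · have e : pvBuckets r qs = (qs.filter (fun z => r z == 0)) ++ (qs.filter (fun z => r z == 1) ++ qs.filter (fun z => r z == 2) ++ qs.filter (fun z => r z == 3) ++ qs.filter (fun z => r z == 4)) := by
      simp [pvBuckets, List.append_assoc]
    rw [e, pv_insertBy_append _ x (qs.filter (fun z => r z == 0)) (qs.filter (fun z => r z == 1) ++ qs.filter (fun z => r z == 2) ++ qs.filter (fun z => r z == 3) ++ qs.filter (fun z => r z == 4))
        (by intro a ha
            have := pv_mem_filter_rank r 0 qs a ha; simp; omega)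
        (by intro c hc
            simp only [List.mem_append] at hc
            rcases hc with (((hc | hc) | hc) | hc) <;>
              first
              | (have := pv_mem_filter_rank r 1 qs c hc; simp; omega)
              | (have := pv_mem_filter_rank r 2 qs c hc; simp; omega)
              | (have := pv_mem_filter_rank r 3 qs c hc; simp; omega)
              | (have := pv_mem_filter_rank r 4 qs c hc; simp; omega)
            )]
    simp [pvBuckets, List.filter_append, h, List.append_assoc]
  · have e : pvBuckets r qs = (qs.filter (fun z => r z == 0) ++ qs.filter (fun z => r z == 1)) ++ (qs.filter (fun z => r z == 2) ++ qs.filter (fun z => r z == 3) ++ qs.filter (fun z => r z == 4)) := by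
      simp [pvBuckets, List.append_assoc]
    rw [e, pv_insertBy_append _ x (qs.filter (fun z => r z == 0) ++ qs.filter (fun z => r z == 1)) (qs.filter (fun z => r z == 2) ++ qs.filter (fun z => r z == 3) ++ qs.filter (fun z => r z == 4))
        (by intro a ha
            simp only [List.mem_append] at ha
            rcases ha with (ha | ha) <;>
              first
              | (have := pv_mem_filter_rank r 0 qs a ha; simp; omega)
              | (have := pv_mem_filter_rank r 1 qs a ha; simp; omega)
            )
        (by intro c hc
            simp only [List.mem_append] at hc
            rcases hc with ((hc | hc) | hc) <;>
              first
              | (have := pv_mem_filter_rank r 2 qs c hc; simp; omega)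
              | (have := pv_mem_filter_rank r 3 qs c hc; simp; omega)
              | (have := pv_mem_filter_rank r 4 qs c hc; simp; omega)
            )]
    simp [pvBuckets, List.filter_append, h, List.append_assoc]
  · have e : pvBuckets r qs = (qs.filter (fun z => r z == 0) ++ qs.filter (fun z => r z == 1) ++ qs.filter (fun z => r z == 2)) ++ (qs.filter (fun z => r z == 3) ++ qs.filter (fun z => r z == 4)) := by
      simp [pvBuckets, List.append_assoc]
    rw [e, pv_insertBy_append _ x (qs.filter (fun z => r z == 0) ++ qs.filter (fun z => r z == 1) ++ qs.filter (fun z => r z == 2)) (qs.filter (fun z => r z == 3) ++ qs.filter (fun z => r z == 4))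
        (by intro a ha
            simp only [List.mem_append] at ha
            rcases ha with ((ha | ha) | ha) <;>
              first
              | (have := pv_mem_filter_rank r 0 qs a ha; simp; omega)
              | (have := pv_mem_filter_rank r 1 qs a ha; simp; omega)
              | (have := pv_mem_filter_rank r 2 qs a ha; simp; omega)
            )
        (by intro c hc
            simp only [List.mem_append] at hc
            rcases hc with (hc | hc) <;>
              first
              | (have := pv_mem_filter_rank r 3 qs c hc; simp; omega)
              | (have := pv_mem_filter_rank r 4 qs c hc; simp; omega)
            )]
    simp [pvBuckets, List.filter_append, h, List.append_assoc]
  · have e : pvBuckets r qs = (qs.filter (fun z => r z == 0) ++ qs.filter (fun z => r z == 1) ++ qs.filter (fun z => r z == 2) ++ qs.filter (fun z => r z == 3)) ++ (qs.filter (fun z => r z == 4)) := by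
      simp [pvBuckets, List.append_assoc]
    rw [e, pv_insertBy_append _ x (qs.filter (fun z => r z == 0) ++ qs.filter (fun z => r z == 1) ++ qs.filter (fun z => r z == 2) ++ qs.filter (fun z => r z == 3)) (qs.filter (fun z => r z == 4))
        (by intro a ha
            simp only [List.mem_append] at ha
            rcases ha with (((ha | ha) | ha) | ha) <;>
              first
              | (have := pv_mem_filter_rank r 0 qs a ha; simp; omega)
              | (have := pv_mem_filter_rank r 1 qs a ha; simp; omega)
              | (have := pv_mem_filter_rank r 2 qs a ha; simp; omega)
              | (have := pv_mem_filter_rank r 3 qs a ha; simp; omega)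
            )
        (by intro c hc
            have := pv_mem_filter_rank r 4 qs c hc; simp; omega)]
    simp [pvBuckets, List.filter_append, h, List.append_assoc]
  · have e : pvBuckets r qs = (qs.filter (fun z => r z == 0) ++ qs.filter (fun z => r z == 1) ++ qs.filter (fun z => r z == 2) ++ qs.filter (fun z => r z == 3) ++ qs.filter (fun z => r z == 4)) ++ (([] : List α)) := by
      simp [pvBuckets, List.append_assoc]
    rw [e, pv_insertBy_append _ x (qs.filter (fun z => r z == 0) ++ qs.filter (fun z => r z == 1) ++ qs.filter (fun z => r z == 2) ++ qs.filter (fun z => r z == 3) ++ qs.filter (fun z => r z == 4)) (([] : List α))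
        (by intro a ha
            simp only [List.mem_append] at ha
            rcases ha with (((ha | ha) | ha) | ha) | ha <;>
              first
              | (have := pv_mem_filter_rank r 0 qs a ha; simp; omega)
              | (have := pv_mem_filter_rank r 1 qs a ha; simp; omega)
              | (have := pv_mem_filter_rank r 2 qs a ha; simp; omega)
              | (have := pv_mem_filter_rank r 3 qs a ha; simp; omega)
              | (have := pv_mem_filter_rank r 4 qs a ha; simp; omega)
            )
        (by intro c hc; simp at hc)]
    simp [pvBuckets, List.filter_append, h, List.append_assoc]

theorem pv_foldl_insert_buckets {α : Type} (r : α → Int) (ps qs : List α)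
    (hb : ∀ x ∈ ps, 0 ≤ r x ∧ r x ≤ 4) :
    ps.foldl (fun acc x => PySem.List.insertBy (fun a b => decide (r a < r b)) x acc)
      (pvBuckets r qs) = pvBuckets r (qs ++ ps) := by
  induction ps generalizing qs with
  | nil => simp
  | cons x ps ih =>
      simp only [List.foldl_cons]
      rw [pv_insert_buckets r x qs (hb x (by simp))]
      rw [ih (qs ++ [x]) (fun y hy => hb y (by simp [hy]))]
      simp [List.append_assoc]

theorem pv_sorted_eq_buckets {α : Type} (r : α → Int) (ps : List α)
    (hb : ∀ x ∈ ps, 0 ≤ r x ∧ r x ≤ 4) :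
    PySem.List.sorted ps r = pvBuckets r ps := by
  rw [PySem.List.sorted_eq_foldl_insertBy]
  have := pv_foldl_insert_buckets r ps [] hb
  simpa [pvBuckets] using this

-- A's grouped/others fold characterised by filters
theorem pv_fold_A (ps : List (String × String)) (g : PySem.Dict String (List String))
    (o : List String) :
    ps.foldl (fun (st : PySem.Dict String (List String) × List String) kv =>
      if st.1.contains kv.1 then (st.1.modify kv.1 [] (· ++ [pvFmt kv]), st.2)
      else (st.1, st.2 ++ [pvFmt kv])) (g, o) =
    ( ((ps.filter (fun kv => g.contains kv.1)).map (fun kv => (kv.1, pvFmt kv))).foldl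
        (fun d p => d.modify p.1 [] (· ++ [p.2])) g,
      o ++ (ps.filter (fun kv => !g.contains kv.1)).map pvFmt ) := by
  induction ps generalizing g o with
  | nil => simp
  | cons kv ps ih =>
      by_cases h : g.contains kv.1 = true
      · have hcont : ∀ k', (g.modify kv.1 [] (· ++ [pvFmt kv])).contains k' = g.contains k' := by
          intro k'
          rw [PySem.Dict.contains_modify]
          by_cases e : k' = kv.1
          · subst e; simp [h]
          · simp [e]
        simp only [List.foldl_cons, List.filter_cons, h, if_true, Bool.not_true, List.map_cons]
        rw [ih (g.modify kv.1 [] (· ++ [pvFmt kv])) o]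
        simp only [hcont]
        simp
      · rw [Bool.not_eq_true] at h
        simp only [List.foldl_cons, List.filter_cons, h, Bool.not_false, Bool.false_eq_true,
          if_false]
        rw [ih g (o ++ [pvFmt kv])]
        simp [List.append_assoc]

-- the rank B sorts by, written out
theorem pv_rank_eq (kv : String × String) :
    pvRank kv = (if kv.1 = "effective_date" then 0 else if kv.1 = "jurisdiction" then 1
      else if kv.1 = "party" then 2 else if kv.1 = "term" then 3 else 4) := by
  have hmk : pvOrderIndex =
      PySem.Dict.mk [("effective_date", 0), ("jurisdiction", 1), ("party", 2), ("term", 3)] := by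
    decide
  rw [pvRank, hmk, PySem.Dict.getD_eq_get?_getD]
  by_cases h1 : kv.1 = "effective_date"
  · simp [PySem.Dict.get?_mk_cons, h1]
  · by_cases h2 : kv.1 = "jurisdiction"
    · simp [PySem.Dict.get?_mk_cons, h2]
    · by_cases h3 : kv.1 = "party"
      · simp [PySem.Dict.get?_mk_cons, h3]
      · by_cases h4 : kv.1 = "term"
        · simp [PySem.Dict.get?_mk_cons, h4]
        · simp [h1, h2, h3, h4, Ne.symm h1, Ne.symm h2, Ne.symm h3, Ne.symm h4,
            PySem.List.len_eq, pvSchema, PySem.Dict.get?]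

theorem pv_rank_bounds (kv : String × String) : 0 ≤ pvRank kv ∧ pvRank kv ≤ 4 := by
  rw [pv_rank_eq]; split_ifs <;> omega

def pvG0 : PySem.Dict String (List String) :=
  PySem.Dict.ofList (pvSchema.map (fun k => (k, ([] : List String))))

theorem pv_contains_g0 (k : String) :
    pvG0.contains k = (k == "effective_date" || k == "jurisdiction" || k == "party" || k == "term") := by
  have hmk : pvG0 = PySem.Dict.mk [("effective_date", []), ("jurisdiction", []),
      ("party", []), ("term", [])] := by decide
  rw [hmk, PySem.Dict.contains_mk]
  simp only [List.any_cons, List.any_nil, Bool.or_false]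
  simp [BEq.comm, Bool.or_comm, Bool.or_left_comm]

theorem pv_rank_filter_eq (i : Int) (c : String) (hc : pvSchema[i.toNat]? = some c)
    (hi : 0 ≤ i ∧ i ≤ 3) (kv : String × String) :
    (pvRank kv == i) = (kv.1 == c) := by
  rw [pv_rank_eq]
  have h03 : i = 0 ∨ i = 1 ∨ i = 2 ∨ i = 3 := by omega
  rcases h03 with h | h | h | h <;> subst h <;>
    simp only [pvSchema] at hc <;> simp at hc <;> subst hc <;>
    split_ifs with h1 h2 h3 h4 <;> simp_all

theorem pv_rank_four_iff (kv : String × String) :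
    (pvRank kv == (4 : Int)) = !pvG0.contains kv.1 := by
  rw [pv_rank_eq, pv_contains_g0]
  split_ifs with h1 h2 h3 h4 <;> simp_all

theorem pv_fps_filter (ps : List (String × String)) (c : String)
    (hc : pvG0.contains c = true) :
    (((ps.filter (fun kv => pvG0.contains kv.1)).map (fun kv => (kv.1, pvFmt kv))).filter
        (fun p => p.1 == c)).map (fun p => p.2) =
      (ps.filter (fun kv => kv.1 == c)).map pvFmt := by
  rw [List.filter_map, List.filter_filter]
  rw [List.map_map]
  apply congrArg
  apply List.filter_congr
  intro kv _
  show ((kv.1, pvFmt kv).1 == c && pvG0.contains kv.1) = (kv.1 == c)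
  by_cases e : kv.1 = c
  · subst e; simp [hc]
  · simp [e]

-- ===== VERDICT (by name: the statement is the Claim_ definition above) =====
theorem sort_label_fields_spec : Claim_equal_sort_label_fields := by
  unfold Claim_equal_sort_label_fields
  intro s _
  unfold Spec_sort_label_fields sort_label_fields sort_label_fields_alt
  simp only []
  rw [show PySem.Dict.ofList (pvSchema.map (fun k => (k, ([] : List String)))) = pvG0 from rfl]
  rw [pv_fold_A (pvParse s) pvG0 []]
  rw [pv_sorted_eq_buckets pvRank (pvParse s) (fun x _ => pv_rank_bounds x)]
  apply congrArg
  have hF0 : (pvParse s).filter (fun kv => pvRank kv == (0 : Int)) =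
      (pvParse s).filter (fun kv => kv.1 == "effective_date") :=
    List.filter_congr (fun kv _ => pv_rank_filter_eq 0 _ (by simp [pvSchema]) (by omega) kv)
  have hF1 : (pvParse s).filter (fun kv => pvRank kv == (1 : Int)) =
      (pvParse s).filter (fun kv => kv.1 == "jurisdiction") :=
    List.filter_congr (fun kv _ => pv_rank_filter_eq 1 _ (by simp [pvSchema]) (by omega) kv)
  have hF2 : (pvParse s).filter (fun kv => pvRank kv == (2 : Int)) =
      (pvParse s).filter (fun kv => kv.1 == "party") :=
    List.filter_congr (fun kv _ => pv_rank_filter_eq 2 _ (by simp [pvSchema]) (by omega) kv)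
  have hF3 : (pvParse s).filter (fun kv => pvRank kv == (3 : Int)) =
      (pvParse s).filter (fun kv => kv.1 == "term") :=
    List.filter_congr (fun kv _ => pv_rank_filter_eq 3 _ (by simp [pvSchema]) (by omega) kv)
  have hF4 : (pvParse s).filter (fun kv => pvRank kv == (4 : Int)) =
      (pvParse s).filter (fun kv => !pvG0.contains kv.1) :=
    List.filter_congr (fun kv _ => pv_rank_four_iff kv)
  simp only [pvBuckets, List.map_append, hF0, hF1, hF2, hF3, hF4]
  simp only [pvSchema, List.foldl_cons, List.foldl_nil]
  simp only [PySem.Dict.getD_foldl_modify_append]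
  rw [pv_fps_filter (pvParse s) "effective_date" (by decide),
      pv_fps_filter (pvParse s) "jurisdiction" (by decide),
      pv_fps_filter (pvParse s) "party" (by decide),
      pv_fps_filter (pvParse s) "term" (by decide)]
  have hge : pvG0.getD "effective_date" [] = [] := by decide
  have hgj : pvG0.getD "jurisdiction" [] = [] := by decide
  have hgp : pvG0.getD "party" [] = [] := by decide
  have hgt : pvG0.getD "term" [] = [] := by decide
  simp [hge, hgj, hgp, hgt, List.append_assoc]
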